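-- pv_equiv track=rewrite | github.com/codenotes666-blip/AI-Exchange-Client | web-server-app/mail_web_server.py | _extract_cn_from_legacy_dn
-- ===== SOURCE A (Python) =====
-- def _extract_cn_from_legacy_dn(value: str) -> str:
--     # Legacy DN often looks like: /O=.../OU=.../CN=Recipients/CN=Some.User
--     # Return the last CN segment if present.
--     try:
--         parts = str(value).split("/")
--         cns = []
--         for p in parts:
--             if p.lower().startswith("cn=") and len(p) > 3:
--                 cns.append(p[3:])
--         return (cns[-1] if cns else "").strip()
--     except Exception:
--         return ""
-- ===== SOURCE B (Python) =====
-- def _extract_cn_from_legacy_dn(value: str) -> str: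
--     # Single forward character scan (state machine): track the current segment and
--     # the latest CN value seen; no split, no intermediate list of matches.
--     best = ""
--     cur = ""
--     for ch in str(value):
--         if ch == "/":
--             if cur.lower().startswith("cn=") and len(cur) > 3:
--                 best = cur[3:]
--             cur = ""
--         else:
--             cur = cur + ch
--     if cur.lower().startswith("cn=") and len(cur) > 3:
--         best = cur[3:]
--     return best.strip()
-- ===== Notes on version B (the rewrite author's own statement) =====
-- stated objective: simpler
-- what changed: Replaces the token split plus a filtering loop with an accumulator list and a final last-element lookup by one forward character-level state machine that keeps only the current segment and the latest CN value, so no token list and no list of matches is built.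
import Mathlib
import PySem

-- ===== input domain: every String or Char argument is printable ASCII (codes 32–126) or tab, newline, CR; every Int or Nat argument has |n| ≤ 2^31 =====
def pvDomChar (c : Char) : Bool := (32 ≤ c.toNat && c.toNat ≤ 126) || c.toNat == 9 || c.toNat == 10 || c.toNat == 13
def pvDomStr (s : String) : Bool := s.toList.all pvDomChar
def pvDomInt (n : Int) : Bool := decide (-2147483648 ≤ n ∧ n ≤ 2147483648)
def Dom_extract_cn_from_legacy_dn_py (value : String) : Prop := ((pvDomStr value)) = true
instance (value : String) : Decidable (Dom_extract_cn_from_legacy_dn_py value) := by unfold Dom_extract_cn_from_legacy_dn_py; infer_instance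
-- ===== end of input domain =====

-- B replaces split('/')+filter-loop+cns[-1] by one forward character-level state machine (objective: simpler).

-- ===== PORT A =====
-- split on '/', collect p[3:] for qualifying tokens, take cns[-1] (or "") and strip
def extract_cn_from_legacy_dn_py (value : String) : String :=
  let parts := PySem.Chars.splitOn value.toList ['/']
  let cns : List (List Char) := parts.foldl (fun acc p =>
      if PySem.Chars.startswith (PySem.Chars.lower p) ['c', 'n', '='] && decide (3 < p.length)
      then acc ++ [PySem.List.slice p (some 3) none] else acc) []
  let last : List Char := if cns.isEmpty then [] else PySem.List.pyGetD cns (-1) []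
  String.ofList (PySem.Chars.strip last)

-- ===== PORT B =====
-- B-side helpers: qualification test and the per-character step of Source B's loop
def bCnQual (cur : List Char) : Bool :=
  PySem.Chars.startswith (PySem.Chars.lower cur) ['c', 'n', '='] && decide (3 < cur.length)

def bCnStep (st : List Char × List Char) (ch : Char) : List Char × List Char :=
  if ch = '/' then (if bCnQual st.2 then PySem.List.slice st.2 (some 3) none else st.1, [])
  else (st.1, st.2 ++ [ch])

def extract_cn_from_legacy_dn_py_alt (value : String) : String :=
  let st := value.toList.foldl bCnStep ([], [])
  String.ofList (PySem.Chars.strip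
    (if bCnQual st.2 then PySem.List.slice st.2 (some 3) none else st.1))

-- ===== PRECONDITION & SPEC =====
def Spec_extract_cn_from_legacy_dn_py (value : String) (out : String) : Prop := out = extract_cn_from_legacy_dn_py_alt value
instance (value : String) (out : String) : Decidable (Spec_extract_cn_from_legacy_dn_py value out) := by unfold Spec_extract_cn_from_legacy_dn_py; infer_instance

-- ===== CLAIM (what is proved, stated in full; the proofs are below) =====
def Claim_equal_extract_cn_from_legacy_dn_py : Prop := ∀ (value : String), Dom_extract_cn_from_legacy_dn_py value → Spec_extract_cn_from_legacy_dn_py value (extract_cn_from_legacy_dn_py value)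

-- ===== LEMMAS AND PROOFS =====

-- structural description of splitting on '/'
def mySplit : List Char → List (List Char)
  | [] => [[]]
  | c :: l => if c = '/' then [] :: mySplit l
              else match mySplit l with
                   | [] => [[c]]
                   | s :: ss => (c :: s) :: ss

def modHead (f : List Char → List Char) : List (List Char) → List (List Char)
  | [] => []
  | s :: ss => f s :: ss

-- the common "latest qualifying CN value" fold over segments
def foldSeg (best : List Char) (segs : List (List Char)) : List Char :=
  segs.foldl (fun b s => if bCnQual s then PySem.List.slice s (some 3) none else b) best

theorem mySplit_ne_nil (l : List Char) : mySplit l ≠ [] := by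
  cases l with
  | nil => simp [mySplit]
  | cons c l =>
    simp only [mySplit]
    split
    · simp
    · split <;> simp

theorem modHead_nil (ss : List (List Char)) :
    modHead (fun x => ([] : List Char) ++ x) ss = ss := by
  cases ss <;> simp [modHead]

theorem modHead_id (ss : List (List Char)) :
    modHead (fun x => x) ss = ss := by
  cases ss <;> simp [modHead]

theorem foldSeg_cons (b p : List Char) (segs : List (List Char)) :
    foldSeg b (p :: segs)
      = foldSeg (if bCnQual p then PySem.List.slice p (some 3) none else b) segs := rfl

theorem splitOn_go_eq (fuel : Nat) : ∀ (l : List Char), l.length < fuel →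
    ∀ (cur : List Char) (acc : List (List Char)),
    PySem.Chars.splitOn.go ['/'] fuel l cur acc
      = acc.reverse ++ modHead (fun x => cur.reverse ++ x) (mySplit l) := by
  induction fuel with
  | zero => intro l h; omega
  | succ fuel ih =>
    intro l h cur acc
    cases l with
    | nil =>
      simp [PySem.Chars.splitOn.go, mySplit, modHead]
    | cons c rest =>
      by_cases hc : c = '/'
      · subst hc
        rw [show PySem.Chars.splitOn.go ['/'] (fuel + 1) ('/' :: rest) cur acc
              = PySem.Chars.splitOn.go ['/'] fuel rest [] (cur.reverse :: acc) by
            simp [PySem.Chars.splitOn.go, List.isPrefixOf]]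
        rw [ih rest (by simpa using Nat.lt_of_succ_lt_succ h) [] (cur.reverse :: acc)]
        simp only [List.reverse_nil, List.nil_append]
        rw [modHead_id]
        simp [mySplit, modHead]
      · rw [show PySem.Chars.splitOn.go ['/'] (fuel + 1) (c :: rest) cur acc
              = PySem.Chars.splitOn.go ['/'] fuel rest (c :: cur) acc by
            simp only [PySem.Chars.splitOn.go, List.isPrefixOf]
            rw [if_neg]
            simp only [Bool.and_eq_true, beq_iff_eq]
            rintro ⟨hcc, -⟩
            exact hc hcc.symm]
        rw [ih rest (by simpa using Nat.lt_of_succ_lt_succ h) (c :: cur) acc]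
        simp only [mySplit, if_neg hc, List.reverse_cons]
        cases hms : mySplit rest with
        | nil => exact absurd hms (mySplit_ne_nil rest)
        | cons s ss => simp [modHead]

theorem splitOn_eq_mySplit (l : List Char) :
    PySem.Chars.splitOn l ['/'] = mySplit l := by
  rw [PySem.Chars.splitOn, splitOn_go_eq (l.length + 1) l (by omega) [] []]
  simp only [List.reverse_nil, List.nil_append]
  exact modHead_id (mySplit l)

-- A's tail extraction: "last of the accumulator list" commutes with the append-if fold
def cnsLast (xs : List (List Char)) : List Char :=
  if xs.isEmpty then [] else PySem.List.pyGetD xs (-1) []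

theorem cnsLast_foldl (segs : List (List Char)) : ∀ (acc : List (List Char)),
    cnsLast (segs.foldl (fun acc p =>
        if PySem.Chars.startswith (PySem.Chars.lower p) ['c', 'n', '='] && decide (3 < p.length)
        then acc ++ [PySem.List.slice p (some 3) none] else acc) acc)
      = foldSeg (cnsLast acc) segs := by
  induction segs with
  | nil => intro acc; simp [foldSeg]
  | cons p segs ih =>
    intro acc
    rw [List.foldl_cons, foldSeg_cons]
    simp only [bCnQual]
    by_cases hq : (PySem.Chars.startswith (PySem.Chars.lower p) ['c', 'n', '='] && decide (3 < p.length)) = true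
    · rw [if_pos hq, if_pos hq, ih]
      congr 1
      simp [cnsLast, PySem.List.pyGetD_neg_one_append_singleton]
    · rw [if_neg hq, if_neg hq, ih]

-- B's char-level loop computes the same segment fold
theorem bCnStep_foldl (l : List Char) : ∀ (best cur : List Char),
    (if bCnQual (l.foldl bCnStep (best, cur)).2
     then PySem.List.slice (l.foldl bCnStep (best, cur)).2 (some 3) none
     else (l.foldl bCnStep (best, cur)).1)
      = foldSeg best (modHead (fun x => cur ++ x) (mySplit l)) := by
  induction l with
  | nil =>
    intro best cur
    simp [mySplit, modHead, foldSeg]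
  | cons c l ih =>
    intro best cur
    by_cases hc : c = '/'
    · subst hc
      simp only [List.foldl_cons, bCnStep, reduceIte]
      rw [ih (if bCnQual cur then PySem.List.slice cur (some 3) none else best) []]
      rw [modHead_nil]
      simp only [mySplit, reduceIte, modHead, List.append_nil]
      rw [foldSeg_cons]
    · simp only [List.foldl_cons, bCnStep, if_neg hc]
      rw [ih best (cur ++ [c])]
      simp only [mySplit, if_neg hc]
      cases hms : mySplit l with
      | nil => exact absurd hms (mySplit_ne_nil l)
      | cons s ss => simp [modHead]

-- the two let-free result expressions agree
theorem cn_main_eq (l : List Char) :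
    (if ((mySplit l).foldl (fun acc p =>
        if PySem.Chars.startswith (PySem.Chars.lower p) ['c', 'n', '='] && decide (3 < p.length)
        then acc ++ [PySem.List.slice p (some 3) none] else acc) []).isEmpty then ([] : List Char)
     else PySem.List.pyGetD ((mySplit l).foldl (fun acc p =>
        if PySem.Chars.startswith (PySem.Chars.lower p) ['c', 'n', '='] && decide (3 < p.length)
        then acc ++ [PySem.List.slice p (some 3) none] else acc) []) (-1) [])
      = (if bCnQual (l.foldl bCnStep ([], [])).2
         then PySem.List.slice (l.foldl bCnStep ([], [])).2 (some 3) none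
         else (l.foldl bCnStep ([], [])).1) := by
  rw [show (if ((mySplit l).foldl (fun acc p =>
        if PySem.Chars.startswith (PySem.Chars.lower p) ['c', 'n', '='] && decide (3 < p.length)
        then acc ++ [PySem.List.slice p (some 3) none] else acc) []).isEmpty then ([] : List Char)
     else PySem.List.pyGetD ((mySplit l).foldl (fun acc p =>
        if PySem.Chars.startswith (PySem.Chars.lower p) ['c', 'n', '='] && decide (3 < p.length)
        then acc ++ [PySem.List.slice p (some 3) none] else acc) []) (-1) [])
      = cnsLast ((mySplit l).foldl (fun acc p =>
        if PySem.Chars.startswith (PySem.Chars.lower p) ['c', 'n', '='] && decide (3 < p.length)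
        then acc ++ [PySem.List.slice p (some 3) none] else acc) []) from rfl]
  rw [cnsLast_foldl (mySplit l) [], bCnStep_foldl l [] [], modHead_nil]
  rfl

-- ===== VERDICT (by name: the statement is the Claim_ definition above) =====
theorem extract_cn_from_legacy_dn_py_spec : Claim_equal_extract_cn_from_legacy_dn_py := by
  intro value _
  unfold Spec_extract_cn_from_legacy_dn_py extract_cn_from_legacy_dn_py extract_cn_from_legacy_dn_py_alt
  simp only [splitOn_eq_mySplit]
  rw [cn_main_eq]
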